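-- pv_equiv track=rewrite | github.com/choco1911/try_py | projects/remstat/usd_par.py | tag_cutter
-- ===== SOURCE A (Python) =====
-- def tag_cutter(l_tagged):
--    t_start = l_tagged.find('>') + 1
--    t_end = l_tagged.rfind('<')
--    l_cleared = l_tagged[t_start:t_end]
--    if l_cleared.startswith('<') or l_cleared.endswith('>'):
--         return tag_cutter(l_cleared)
--    if l_cleared :
--         return l_cleared
-- ===== SOURCE B (Python) =====
-- def _strip_once(s):
--     """Drop everything up to the first '>' and from the last '<' on."""
--     return s[s.find('>') + 1 : s.rfind('<')]
--
--
-- def tag_cutter(l_tagged):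
--     # Iterative rewrite: strip one tag layer per loop turn instead of recursing.
--     cur = _strip_once(l_tagged)
--     while cur.startswith('<') or cur.endswith('>'):
--         cur = _strip_once(cur)
--     return cur if cur else None
-- ===== Notes on version B (the rewrite author's own statement) =====
-- stated objective: simpler
-- what changed: A's self-recursion is replaced by an explicit while loop over a current-string variable with a _strip_once helper: the slice is computed once per turn and the continue test is made on the current string before stripping again, so the truthy return sits once at the end instead of inside the recursive body.
import Mathlib
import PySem

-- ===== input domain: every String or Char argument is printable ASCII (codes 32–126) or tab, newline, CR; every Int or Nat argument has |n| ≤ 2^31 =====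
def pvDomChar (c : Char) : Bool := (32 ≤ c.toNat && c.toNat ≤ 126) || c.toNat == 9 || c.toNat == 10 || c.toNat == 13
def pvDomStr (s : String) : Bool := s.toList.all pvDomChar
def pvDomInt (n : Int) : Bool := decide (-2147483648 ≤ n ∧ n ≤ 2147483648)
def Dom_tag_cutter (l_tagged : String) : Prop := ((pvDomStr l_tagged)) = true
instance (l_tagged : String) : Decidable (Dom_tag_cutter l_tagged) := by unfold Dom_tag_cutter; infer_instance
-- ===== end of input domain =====

-- B replaces A's self-recursion by an explicit loop over a current-string variable with a
-- strip-once helper; same return value, same cost (objective: simpler decomposition).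


-- ===== PORT A =====

-- bound on rfind.go used for termination of both ports
theorem pvRfindGoLe (s sub : List Char) : ∀ k : Nat, PySem.Chars.rfind.go s sub k ≤ (k : Int) := by
  intro k
  induction k with
  | zero => simp only [PySem.Chars.rfind.go]; split <;> simp
  | succ n ih =>
      simp only [PySem.Chars.rfind.go]
      split
      · simp
      · exact le_trans ih (by push_cast; omega)

theorem pvIsPrefixOfNil (sub : List Char) (h : sub ≠ []) : sub.isPrefixOf ([] : List Char) = false := by
  cases sub <;> simp_all [List.isPrefixOf]

-- rfind with a nonempty needle points strictly before the end (the slice shrinks)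
theorem pvRfindLe (s : List Char) : PySem.Chars.rfind s ['<'] ≤ (s.length : Int) - 1 := by
  unfold PySem.Chars.rfind
  cases h : s.length with
  | zero =>
      have hs : s = [] := List.length_eq_zero_iff.mp h
      subst hs
      decide
  | succ m =>
      have hdrop : List.drop (m + 1) s = [] := List.drop_eq_nil_of_le (by omega)
      have hle := pvRfindGoLe s ['<'] m
      simp only [PySem.Chars.rfind.go, hdrop, pvIsPrefixOfNil ['<'] (by simp),
        Bool.false_eq_true, if_false]
      push_cast
      omega

-- A's recursion argument is strictly shorter whenever A recurses
theorem pvClearedLt (u : String)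
    (h : (PySem.Str.startswith (PySem.Str.slice u (some (PySem.Str.find u ">" + 1)) (some (PySem.Str.rfind u "<"))) "<"
        || PySem.Str.endswith (PySem.Str.slice u (some (PySem.Str.find u ">" + 1)) (some (PySem.Str.rfind u "<"))) ">") = true) :
    (PySem.Str.slice u (some (PySem.Str.find u ">" + 1)) (some (PySem.Str.rfind u "<"))).toList.length < u.toList.length := by
  set a : Int := PySem.Str.find u ">" + 1 with ha
  set b : Int := PySem.Str.rfind u "<" with hb
  have hlist : (PySem.Str.slice u (some a) (some b)).toList
      = PySem.List.slice u.toList (some a) (some b) := by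
    simp [PySem.Str.slice, String.toList_ofList]
  have hne : (PySem.Str.slice u (some a) (some b)).toList ≠ [] := by
    rcases Bool.or_eq_true_iff.mp h with h1 | h1
    · rw [PySem.Str.startswith_eq] at h1
      have := (PySem.Chars.startswith_iff _ _).mp h1
      intro hnil; rw [hnil] at this; simpa using this.length_le
    · rw [PySem.Str.endswith_eq] at h1
      have := (PySem.Chars.endswith_iff _ _).mp h1
      intro hnil; rw [hnil] at this; simpa using this.length_le
  rw [hlist] at hne ⊢
  have hlen := PySem.List.length_slice u.toList a b
  have hbb : b ≤ (u.toList.length : Int) - 1 := by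
    rw [hb, PySem.Str.rfind_eq]
    have := pvRfindLe u.toList
    simpa using this
  have hclampb : PySem.List.clampIdx u.toList.length b ≤ u.toList.length - 1 ∨ u.toList.length = 0 := by
    by_cases h0 : u.toList.length = 0
    · right; exact h0
    · left
      unfold PySem.List.clampIdx
      split
      · split <;> omega
      · have : b.toNat ≤ u.toList.length - 1 := by omega
        omega
  have hpos : 0 < (PySem.List.slice u.toList (some a) (some b)).length :=
    List.length_pos_iff.mpr hne
  rcases hclampb with hc | hc
  · omega
  · have : PySem.List.clampIdx u.toList.length b ≤ u.toList.length := by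
      unfold PySem.List.clampIdx; split
      · split <;> omega
      · omega
    omega

def tag_cutter (l_tagged : String) : Option String :=
  let t_start := PySem.Str.find l_tagged ">" + 1
  let t_end := PySem.Str.rfind l_tagged "<"
  let l_cleared := PySem.Str.slice l_tagged (some t_start) (some t_end)
  if h : (PySem.Str.startswith l_cleared "<" || PySem.Str.endswith l_cleared ">") = true then
    tag_cutter l_cleared
  else if l_cleared ≠ "" then some l_cleared else none
termination_by l_tagged.toList.length
decreasing_by
  exact pvClearedLt l_tagged h

-- ===== PORT B =====

-- drop everything up to the first '>' and from the last '<' on (Python _strip_once)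
def stripOnce (s : String) : String :=
  PySem.Str.slice s (some (PySem.Str.find s ">" + 1)) (some (PySem.Str.rfind s "<"))

-- B's loop body shrinks its argument whenever the loop continues
theorem pvStripShrinks (cur : String)
    (h : (PySem.Str.startswith cur "<" || PySem.Str.endswith cur ">") = true) :
    (stripOnce cur).toList.length < cur.toList.length := by
  have hne : cur.toList ≠ [] := by
    rcases Bool.or_eq_true_iff.mp h with h1 | h1
    · rw [PySem.Str.startswith_eq] at h1
      have := (PySem.Chars.startswith_iff _ _).mp h1
      intro hnil; rw [hnil] at this; simpa using this.length_le
    · rw [PySem.Str.endswith_eq] at h1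
      have := (PySem.Chars.endswith_iff _ _).mp h1
      intro hnil; rw [hnil] at this; simpa using this.length_le
  have hlist : (stripOnce cur).toList
      = PySem.List.slice cur.toList (some (PySem.Str.find cur ">" + 1)) (some (PySem.Str.rfind cur "<")) := by
    simp [stripOnce, PySem.Str.slice, String.toList_ofList]
  rw [hlist]
  have hlen := PySem.List.length_slice cur.toList (PySem.Str.find cur ">" + 1) (PySem.Str.rfind cur "<")
  have hbb : PySem.Str.rfind cur "<" ≤ (cur.toList.length : Int) - 1 := by
    rw [PySem.Str.rfind_eq]
    have := pvRfindLe cur.toList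
    simpa using this
  have h0 : cur.toList.length ≠ 0 := fun hz => hne (List.length_eq_zero_iff.mp hz)
  have hclampb : PySem.List.clampIdx cur.toList.length (PySem.Str.rfind cur "<") ≤ cur.toList.length - 1 := by
    unfold PySem.List.clampIdx
    split
    · split <;> omega
    · omega
  omega

-- B's while loop: keep stripping while the current string still starts '<' or ends '>'
def tagLoop (cur : String) : Option String :=
  if h : (PySem.Str.startswith cur "<" || PySem.Str.endswith cur ">") = true then
    tagLoop (stripOnce cur)
  else if cur ≠ "" then some cur else none
termination_by cur.toList.length
decreasing_by
  exact pvStripShrinks cur h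

def tag_cutter_alt (l_tagged : String) : Option String :=
  tagLoop (stripOnce l_tagged)

-- ===== PRECONDITION & SPEC =====
def Spec_tag_cutter (l_tagged : String) (out : Option String) : Prop := out = tag_cutter_alt l_tagged
instance (l_tagged : String) (out : Option String) : Decidable (Spec_tag_cutter l_tagged out) := by unfold Spec_tag_cutter; infer_instance

-- ===== CLAIM (what is proved, stated in full; the proofs are below) =====
def Claim_equal_tag_cutter : Prop := ∀ (l_tagged : String), Dom_tag_cutter l_tagged → Spec_tag_cutter l_tagged (tag_cutter l_tagged)

-- ===== LEMMAS AND PROOFS =====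

-- A's recursion and B's loop agree: one A step is one loop turn on the stripped string
theorem pvEq (s : String) : tag_cutter s = tagLoop (stripOnce s) := by
  rw [tag_cutter, tagLoop]
  by_cases h : (PySem.Str.startswith (stripOnce s) "<" || PySem.Str.endswith (stripOnce s) ">") = true
  · have h' : (PySem.Str.startswith
        (PySem.Str.slice s (some (PySem.Str.find s ">" + 1)) (some (PySem.Str.rfind s "<"))) "<"
        || PySem.Str.endswith
        (PySem.Str.slice s (some (PySem.Str.find s ">" + 1)) (some (PySem.Str.rfind s "<"))) ">") = true := h
    rw [dif_pos h', dif_pos h]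
    exact pvEq (stripOnce s)
  · have h' : ¬ (PySem.Str.startswith
        (PySem.Str.slice s (some (PySem.Str.find s ">" + 1)) (some (PySem.Str.rfind s "<"))) "<"
        || PySem.Str.endswith
        (PySem.Str.slice s (some (PySem.Str.find s ">" + 1)) (some (PySem.Str.rfind s "<"))) ">") = true := h
    rw [dif_neg h', dif_neg h]
    simp only [stripOnce]
termination_by s.toList.length
decreasing_by
  exact pvClearedLt s h

-- ===== VERDICT (by name: the statement is the Claim_ definition above) =====
theorem tag_cutter_spec : Claim_equal_tag_cutter := by
  intro l_tagged _
  unfold Spec_tag_cutter tag_cutter_alt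
  exact pvEq l_tagged
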